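-- pv_equiv track=rewrite | github.com/yyuan29/project001 | markdown_compiler/util/line_functions.py | compile_bold_underscore
-- ===== SOURCE A (Python) =====
-- def compile_bold_underscore(line):
--     '''
--     Convert "__bold__" to "<b>bold</b>".
--
--     HINT:
--     This function is similar to the strikethrough function.
--
--     >>> compile_bold_underscore('__This is bold!__ This is not bold.')
--     '<b>This is bold!</b> This is not bold.'
--     >>> compile_bold_underscore('__This is bold!__')
--     '<b>This is bold!</b>'
--     >>> compile_bold_underscore('This is __bold__!')
--     'This is <b>bold</b>!'
--     >>> compile_bold_underscore('This is not __bold!')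
--     'This is not __bold!'
--     >>> compile_bold_underscore('__')
--     '__'
--     '''
--     result = ""
--     i = 0
--     while i < len(line):
--         if line[i:i + 2] == "__" and line.find("__", i + 2) != -1:
--             end = line.find("__", i + 2)
--             if end != -1:
--                 result += "<b>" + line[i + 2: end] + "</b>"
--                 i = end + 2
--             else:
--                 result += line[i]
--                 i += 1
--         else:
--             result += line[i]
--             i += 1
--
--     return result
-- ===== SOURCE B (Python) =====
-- def compile_bold_underscore(line):
--     '''Convert "__bold__" to "<b>bold</b>" in a single left-to-right pass.'''
--     out = []
--     pending = None  # None = outside bold; list of chars since the opening "__" otherwise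
--     i, n = 0, len(line)
--     while i < n:
--         if line[i] == "_" and i + 1 < n and line[i + 1] == "_":
--             if pending is None:
--                 pending = []
--             else:
--                 out.append("<b>")
--                 out.extend(pending)
--                 out.append("</b>")
--                 pending = None
--             i += 2
--         else:
--             if pending is None:
--                 out.append(line[i])
--             else:
--                 pending.append(line[i])
--             i += 1
--     if pending is None:
--         return "".join(out)
--     return "".join(out) + "__" + "".join(pending)
-- ===== Notes on version B (the rewrite author's own statement) =====
-- stated objective: faster
-- what changed: replaces A's find()-and-jump loop (which re-scans ahead with str.find and rebuilds the result by repeated string concatenation) with a single left-to-right character pass over a list buffer keeping an in-bold state and a pending buffer, fixed up once at the end if the last opener is unmatched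
import Mathlib
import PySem

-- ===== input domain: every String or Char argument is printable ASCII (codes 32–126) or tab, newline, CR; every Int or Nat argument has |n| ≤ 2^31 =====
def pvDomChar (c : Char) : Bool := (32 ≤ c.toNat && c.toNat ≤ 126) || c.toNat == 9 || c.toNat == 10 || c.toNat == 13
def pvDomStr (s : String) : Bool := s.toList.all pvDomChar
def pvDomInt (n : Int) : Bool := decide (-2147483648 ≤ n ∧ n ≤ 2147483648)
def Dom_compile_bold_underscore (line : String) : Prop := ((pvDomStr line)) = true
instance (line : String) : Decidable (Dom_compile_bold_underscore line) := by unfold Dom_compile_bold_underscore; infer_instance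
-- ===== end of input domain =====

-- B replaces A's find()-and-jump scan (repeated str concatenation) with a single left-to-right
-- pass keeping an in-bold state and a pending buffer (objective: faster, measured).

-- ===== PORT A =====
-- while loop of A: i is the index, `result` the accumulated output;
-- line[i:i+2] is Chars.slice, line.find("__", i+2) is Chars.findFrom.
def pvAGo (s : List Char) (i : Nat) (result : List Char) : List Char :=
  if h : i < s.length then
    if h2 : PySem.Chars.slice s (some (i : Int)) (some ((i : Int) + 2)) = ['_', '_'] ∧
        PySem.Chars.findFrom s ['_', '_'] ((i : Int) + 2) ≠ -1 then
      if PySem.Chars.findFrom s ['_', '_'] ((i : Int) + 2) ≠ -1 then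
        pvAGo s ((PySem.Chars.findFrom s ['_', '_'] ((i : Int) + 2)).toNat + 2)
          (result ++ ('<' :: 'b' :: '>' :: PySem.Chars.slice s (some ((i : Int) + 2)) (some (PySem.Chars.findFrom s ['_', '_'] ((i : Int) + 2)))) ++ ['<', '/', 'b', '>'])
      else
        pvAGo s (i + 1) (result ++ [s.get ⟨i, h⟩])
    else
      pvAGo s (i + 1) (result ++ [s.get ⟨i, h⟩])
  else result
termination_by s.length - i
decreasing_by
  · -- the matched "__" slice has length 2, so i + 2 ≤ s.length, and findFrom ≥ i + 2
    obtain ⟨hsl, hne⟩ := h2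
    have hc : ((i : Int) + 2) = (((i + 2 : Nat)) : Int) := by push_cast; ring
    rw [PySem.Chars.slice_eq_listSlice] at hsl
    have key := PySem.List.slice_natCast_add (xs := s) (j := i) (n := 2)
    rw [show ((i : Nat) : Int) + ((2 : Nat) : Int) = (i : Int) + 2 by push_cast; ring] at key
    rw [key] at hsl
    have hlen : 2 ≤ (List.drop i s).length := by
      have h' : (List.take 2 (List.drop i s)).length = 2 := by rw [hsl]; rfl
      rw [List.length_take] at h'
      omega
    have hk : i + 2 ≤ s.length := by
      rw [List.length_drop] at hlen; omega
    rw [hc] at hne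
    have hspec := (PySem.Chars.findFrom_natCast_spec s ['_', '_'] (i + 2) hk hne).1
    rw [← hc] at hspec
    omega
  · omega
  · omega

def compile_bold_underscore (line : String) : String :=
  String.ofList (pvAGo line.toList 0 [])

-- ===== PORT B =====
-- single pass of B: `pending = none` means not inside bold, `some p` holds the chars seen
-- since the opening "__"; `out` is the output accumulator.
def pvBGo (l : List Char) (pending : Option (List Char)) (out : List Char) : List Char :=
  match l with
  | [] =>
    match pending with
    | none => out
    | some p => out ++ '_' :: '_' :: p
  | c :: r =>
    if c = '_' ∧ r.head? = some '_' then
      match pending with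
      | none => pvBGo r.tail (some []) out
      | some p => pvBGo r.tail none (out ++ '<' :: 'b' :: '>' :: p ++ ['<', '/', 'b', '>'])
    else
      match pending with
      | none => pvBGo r none (out ++ [c])
      | some p => pvBGo r (some (p ++ [c])) out
termination_by l.length
decreasing_by all_goals (simp [List.length_tail]; try omega)

def compile_bold_underscore_alt (line : String) : String :=
  String.ofList (pvBGo line.toList none [])

-- ===== PRECONDITION & SPEC =====
def Spec_compile_bold_underscore (line : String) (out : String) : Prop := out = compile_bold_underscore_alt line
instance (line : String) (out : String) : Decidable (Spec_compile_bold_underscore line out) := by unfold Spec_compile_bold_underscore; infer_instance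

-- ===== CLAIM (what is proved, stated in full; the proofs are below) =====
def Claim_equal_compile_bold_underscore : Prop := ∀ (line : String), Dom_compile_bold_underscore line → Spec_compile_bold_underscore line (compile_bold_underscore line)

-- ===== LEMMAS AND PROOFS =====

theorem bGo_out (n : Nat) : ∀ (l : List Char), l.length ≤ n → ∀ p out,
    pvBGo l p out = out ++ pvBGo l p [] := by
  induction n with
  | zero =>
    intro l hl p out
    have : l = [] := List.eq_nil_of_length_eq_zero (by omega)
    subst this
    cases p <;> simp [pvBGo]
  | succ n ih =>
    intro l hl p out
    cases l with
    | nil => cases p <;> simp [pvBGo]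
    | cons c r =>
      have hr : r.length ≤ n := by simp at hl; omega
      have hrt : r.tail.length ≤ n := by have := r.length_tail; omega
      by_cases hcond : c = '_' ∧ r.head? = some '_'
      · cases p with
        | none =>
          simp only [pvBGo, if_pos hcond]
          rw [ih r.tail hrt (some []) out]
        | some p =>
          simp only [pvBGo, if_pos hcond]
          rw [ih r.tail hrt none (out ++ '<' :: 'b' :: '>' :: p ++ ['<', '/', 'b', '>']),
            ih r.tail hrt none ([] ++ '<' :: 'b' :: '>' :: p ++ ['<', '/', 'b', '>'])]
          simp
      · cases p with
        | none =>
          simp only [pvBGo, if_neg hcond]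
          rw [ih r hr none (out ++ [c]), ih r hr none ([] ++ [c])]
          simp
        | some p =>
          simp only [pvBGo, if_neg hcond]
          rw [ih r hr (some (p ++ [c])) out]

theorem bGo_scan : ∀ (m : List Char) (r p out : List Char),
    (∀ j, j < m.length → ¬ ['_', '_'] <+: (m ++ '_' :: '_' :: r).drop j) →
    pvBGo (m ++ '_' :: '_' :: r) (some p) out
      = pvBGo r none (out ++ '<' :: 'b' :: '>' :: (p ++ m) ++ ['<', '/', 'b', '>']) := by
  intro m
  induction m with
  | nil =>
    intro r p out _
    simp [pvBGo]
  | cons c m' ih =>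
    intro r p out h
    have hcond : ¬ (c = '_' ∧ (m' ++ '_' :: '_' :: r).head? = some '_') := by
      rintro ⟨rfl, hh⟩
      apply h 0 (by simp)
      obtain ⟨t, ht⟩ : ∃ t, m' ++ '_' :: '_' :: r = '_' :: t := by
        cases hm : m' ++ '_' :: '_' :: r with
        | nil => simp [hm] at hh
        | cons d t =>
          rw [hm] at hh; simp at hh
          exact ⟨t, by rw [hh]⟩
      rw [List.drop_zero, List.cons_append, ht]
      exact ⟨t, rfl⟩
    rw [List.cons_append]
    simp only [pvBGo, if_neg hcond]
    rw [ih r (p ++ [c]) out (fun j hj => by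
      have := h (j + 1) (by simp; omega)
      simpa using this)]
    simp

theorem bGo_noocc : ∀ (l : List Char) (p out : List Char), ¬ ['_', '_'] <:+: l →
    pvBGo l (some p) out = out ++ '_' :: '_' :: (p ++ l) := by
  intro l
  induction l with
  | nil => intro p out _; simp [pvBGo]
  | cons c r ih =>
    intro p out hno
    have hcond : ¬ (c = '_' ∧ r.head? = some '_') := by
      rintro ⟨rfl, hh⟩
      apply hno
      obtain ⟨t, ht⟩ : ∃ t, r = '_' :: t := by
        cases hm : r with
        | nil => simp [hm] at hh
        | cons d t => rw [hm] at hh; simp at hh; exact ⟨t, by rw [hh]⟩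
      exact List.IsPrefix.isInfix ⟨t, by simp [ht]⟩
    simp only [pvBGo, if_neg hcond]
    rw [ih (p ++ [c]) out (fun hi => hno (hi.trans (List.suffix_cons c r).isInfix))]
    simp

theorem slice2_eq (s : List Char) (i : Nat) :
    PySem.Chars.slice s (some (i : Int)) (some ((i : Int) + 2)) = List.take 2 (List.drop i s) := by
  rw [PySem.Chars.slice_eq_listSlice]
  have key := PySem.List.slice_natCast_add (xs := s) (j := i) (n := 2)
  rw [show ((i : Nat) : Int) + ((2 : Nat) : Int) = (i : Int) + 2 by push_cast; ring] at key
  exact key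

theorem take2_len {s : List Char} {i : Nat} (h : List.take 2 (List.drop i s) = ['_', '_']) :
    i + 2 ≤ s.length := by
  have h' : (List.take 2 (List.drop i s)).length = 2 := by rw [h]; rfl
  rw [List.length_take, List.length_drop] at h'
  omega

theorem cast2 (i : Nat) : ((i : Int) + 2) = (((i + 2 : Nat)) : Int) := by push_cast; ring

theorem drop_succ_suffix (s : List Char) (i : Nat) :
    List.drop (i + 3) s <:+ List.drop (i + 2) s := by
  have h := List.drop_suffix 1 (List.drop (i + 2) s)
  rw [List.drop_drop] at h
  simpa using h

theorem aGo_copy (s : List Char) (n : Nat) : ∀ i result, s.length - i ≤ n →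
    ¬ ['_', '_'] <:+: s.drop (i + 2) →
    pvAGo s i result = result ++ s.drop i := by
  induction n with
  | zero =>
    intro i result hl _
    rw [pvAGo.eq_def, dif_neg (by omega : ¬ i < s.length),
      List.drop_eq_nil_of_le (by omega)]
    simp
  | succ n ih =>
    intro i result hl hno
    by_cases hi : i < s.length
    · have hstep : pvAGo s i result = pvAGo s (i + 1) (result ++ [s.get ⟨i, hi⟩]) := by
        rw [pvAGo.eq_def, dif_pos hi]
        by_cases hsl : PySem.Chars.slice s (some (i : Int)) (some ((i : Int) + 2)) = ['_', '_']
        · have hk : i + 2 ≤ s.length := take2_len (by rw [← slice2_eq]; exact hsl)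
          have he : PySem.Chars.findFrom s ['_', '_'] ((i : Int) + 2) = -1 := by
            rw [cast2]
            exact (PySem.Chars.findFrom_natCast_eq_neg_one_iff s ['_', '_'] (i + 2) hk).mpr hno
          have hcond : ¬ (PySem.Chars.slice s (some (i : Int)) (some ((i : Int) + 2)) = ['_', '_'] ∧
              PySem.Chars.findFrom s ['_', '_'] ((i : Int) + 2) ≠ -1) := by
            rintro ⟨-, hne⟩; exact hne he
          rw [dif_neg hcond]
        · have hcond : ¬ (PySem.Chars.slice s (some (i : Int)) (some ((i : Int) + 2)) = ['_', '_'] ∧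
              PySem.Chars.findFrom s ['_', '_'] ((i : Int) + 2) ≠ -1) := by
            rintro ⟨h1, -⟩; exact hsl h1
          rw [dif_neg hcond]
      rw [hstep, ih (i + 1) _ (by omega)
        (fun hinf => hno (by simpa using hinf.trans (drop_succ_suffix s i).isInfix))]
      rw [List.drop_eq_getElem_cons hi]
      simp
    · rw [pvAGo.eq_def, dif_neg hi, List.drop_eq_nil_of_le (by omega)]
      simp

theorem aGo_bridge (s : List Char) (n : Nat) : ∀ i result, s.length - i ≤ n →
    pvAGo s i result = result ++ pvBGo (s.drop i) none [] := by
  induction n with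
  | zero =>
    intro i result hl
    rw [pvAGo.eq_def, dif_neg (by omega : ¬ i < s.length), List.drop_eq_nil_of_le (by omega)]
    simp [pvBGo]
  | succ n ih =>
    intro i result hl
    by_cases hi : i < s.length
    swap
    · rw [pvAGo.eq_def, dif_neg hi, List.drop_eq_nil_of_le (by omega)]
      simp [pvBGo]
    by_cases hsl : PySem.Chars.slice s (some (i : Int)) (some ((i : Int) + 2)) = ['_', '_']
    · have hsl' : List.take 2 (List.drop i s) = ['_', '_'] := by rw [← slice2_eq]; exact hsl
      have hk : i + 2 ≤ s.length := take2_len hsl'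
      have hdi : List.drop i s = '_' :: '_' :: List.drop (i + 2) s := by
        have h1 := List.take_append_drop 2 (List.drop i s)
        rw [hsl', List.drop_drop] at h1
        rw [← h1]
        norm_num
      have hBopen : pvBGo (List.drop i s) none [] = pvBGo (List.drop (i + 2) s) (some []) [] := by
        rw [hdi]
        simp [pvBGo]
      by_cases hne : PySem.Chars.findFrom s ['_', '_'] ((i : Int) + 2) = -1
      · -- no closing "__": A copies the rest verbatim, B flushes "__" ++ pending at the end
        have hno : ¬ ['_', '_'] <:+: List.drop (i + 2) s :=
          (PySem.Chars.findFrom_natCast_eq_neg_one_iff s ['_', '_'] (i + 2) hk).mp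
            (by rw [← cast2]; exact hne)
        rw [aGo_copy s (n + 1) i result hl hno, hBopen,
          bGo_noocc (List.drop (i + 2) s) [] [] hno, hdi]
        simp
      · -- a closing "__" exists: A emits <b>…</b> and jumps past it
        have hne' : PySem.Chars.findFrom s ['_', '_'] (((i + 2 : Nat) : Int)) ≠ -1 := by
          rw [← cast2]; exact hne
        have hspec := PySem.Chars.findFrom_natCast_spec s ['_', '_'] (i + 2) hk hne'
        rw [← cast2] at hspec
        obtain ⟨hge, hpre, hmin⟩ := hspec
        have hq2 : i + 2 ≤ (PySem.Chars.findFrom s ['_', '_'] ((i : Int) + 2)).toNat := by omega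
        set q := (PySem.Chars.findFrom s ['_', '_'] ((i : Int) + 2)).toNat with hqdef
        obtain ⟨t, ht⟩ := hpre
        have htq : t = List.drop (q + 2) s := by
          have h2 := congrArg (List.drop 2) ht
          rw [List.drop_drop] at h2
          simpa [show 2 + q = q + 2 by omega] using h2
        have hq : q + 2 ≤ s.length := by
          have h3 := congrArg List.length ht
          simp at h3
          omega
        have hslice : PySem.Chars.slice s (some ((i : Int) + 2))
              (some (PySem.Chars.findFrom s ['_', '_'] ((i : Int) + 2)))
            = List.take (q - (i + 2)) (List.drop (i + 2) s) := by
          rw [PySem.Chars.slice_eq_listSlice,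
            PySem.List.slice_toNat s (by omega : (0 : Int) ≤ (i : Int) + 2) (by omega)]
          have h4 : ((i : Int) + 2).toNat = i + 2 := by omega
          rw [h4]
        set m := List.take (q - (i + 2)) (List.drop (i + 2) s) with hm
        have hmlen : m.length = q - (i + 2) := by
          rw [hm, List.length_take, List.length_drop]
          omega
        have hsplit : List.drop (i + 2) s = m ++ '_' :: '_' :: List.drop (q + 2) s := by
          have h1 := List.take_append_drop (q - (i + 2)) (List.drop (i + 2) s)
          rw [List.drop_drop, show i + 2 + (q - (i + 2)) = q by omega] at h1
          rw [← h1, ← ht, htq]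
          norm_num
          exact hm.symm
        rw [pvAGo.eq_def, dif_pos hi, dif_pos ⟨hsl, hne⟩, if_pos hne, hslice,
          ih (q + 2) _ (by omega), hBopen, hsplit,
          bGo_scan m (List.drop (q + 2) s) [] [] (by
            intro j hj
            rw [← hsplit, List.drop_drop]
            have := hmin (j + (i + 2)) (by omega) (by omega)
            simpa [show i + 2 + j = j + (i + 2) by omega] using this),
          bGo_out (List.drop (q + 2) s).length (List.drop (q + 2) s) le_rfl none
            ([] ++ '<' :: 'b' :: '>' :: ([] ++ m) ++ ['<', '/', 'b', '>'])]
        simp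
    · -- no "__" at position i: both copy one character
      have hcond : ¬ (PySem.Chars.slice s (some (i : Int)) (some ((i : Int) + 2)) = ['_', '_'] ∧
          PySem.Chars.findFrom s ['_', '_'] ((i : Int) + 2) ≠ -1) := by
        rintro ⟨h1, -⟩; exact hsl h1
      have hsl' : List.take 2 (List.drop i s) ≠ ['_', '_'] := by rw [← slice2_eq]; exact hsl
      have hdi : List.drop i s = s[i] :: List.drop (i + 1) s := List.drop_eq_getElem_cons hi
      have hbcond : ¬ (s[i] = '_' ∧ (List.drop (i + 1) s).head? = some '_') := by
        rintro ⟨h1, h2⟩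
        apply hsl'
        cases hd : List.drop (i + 1) s with
        | nil => rw [hd] at h2; simp at h2
        | cons d u =>
          rw [hd] at h2
          simp at h2
          rw [hdi, hd]
          simp [h1, h2]
      rw [pvAGo.eq_def, dif_pos hi, dif_neg hcond,
        ih (i + 1) _ (by omega), hdi]
      conv_rhs => rw [pvBGo]
      rw [if_neg hbcond,
        bGo_out (List.drop (i + 1) s).length (List.drop (i + 1) s) le_rfl none ([] ++ [s[i]])]
      simp

-- ===== VERDICT (by name: the statement is the Claim_ definition above) =====
theorem compile_bold_underscore_spec : Claim_equal_compile_bold_underscore := by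
  intro line _
  unfold Spec_compile_bold_underscore compile_bold_underscore compile_bold_underscore_alt
  have := aGo_bridge line.toList line.toList.length 0 [] (by omega)
  simp at this
  rw [this]
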